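-- pv_equiv track=rewrite | github.com/MRampo/ADM---HMW1-MatteoRampolla | rampolla_1762214.py | sort_digits
-- ===== SOURCE A (Python) =====
-- def sort_digits(d):
--     odd =[]
--     even = []
--     s = ''
--     for x in d:
--         if x%2==0 or x == 0:
--             even.append(x)
--         else:
--             odd.append(x)
--     for x in odd:
--         s += str(x)
--     for x in even:
--         s += str(x)
--     return s
-- ===== SOURCE B (Python) =====
-- def sort_digits(d):
--     return ''.join(str(x) for x in sorted(d, key=lambda x: x % 2 == 0))
-- ===== Notes on version B (the rewrite author's own statement) =====
-- stated objective: idiomatic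
-- what changed: Replaces the two explicit partition lists and three accumulation loops with a single stable sort keyed on parity (odds first) and one join over the sorted list.
import Mathlib
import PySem

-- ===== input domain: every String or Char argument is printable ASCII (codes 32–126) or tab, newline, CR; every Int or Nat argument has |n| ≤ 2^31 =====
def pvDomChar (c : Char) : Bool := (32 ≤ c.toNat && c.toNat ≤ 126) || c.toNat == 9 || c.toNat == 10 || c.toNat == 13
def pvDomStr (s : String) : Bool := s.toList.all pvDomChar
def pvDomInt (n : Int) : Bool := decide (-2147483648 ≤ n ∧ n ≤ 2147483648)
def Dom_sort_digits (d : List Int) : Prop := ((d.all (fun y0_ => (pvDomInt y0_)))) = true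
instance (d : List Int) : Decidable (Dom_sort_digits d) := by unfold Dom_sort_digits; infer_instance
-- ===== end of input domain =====

-- B replaces A's two partition lists and three loops with one stable sort keyed on parity plus a join (idiomatic; same return value, no side effects).

-- ===== PORT A =====
-- A: build odd/even partition lists with one loop, then concatenate str(x) over odd, then over even.
-- (string building done on List Char, wrapped in String.mk at the end, since Lean's String.append is kernel-opaque)
def sort_digits (d : List Int) : String :=
  let oe := d.foldl (fun (p : List Int × List Int) x =>
      if PySem.Int.mod x 2 == 0 || x == 0 then (p.1, p.2 ++ [x]) else (p.1 ++ [x], p.2)) ([], [])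
  let s1 := oe.1.foldl (fun s x => s ++ PySem.Int.toChars x) ([] : List Char)
  let s2 := oe.2.foldl (fun s x => s ++ PySem.Int.toChars x) s1
  String.mk s2

-- ===== PORT B =====
-- B: ''.join(str(x) for x in sorted(d, key=lambda x: x % 2 == 0)) — stable sort, odds (key False) first.
def sort_digits_alt (d : List Int) : String :=
  String.mk (((PySem.List.sorted d (fun x => PySem.Int.mod x 2 == 0) false).map PySem.Int.toChars).flatten)

-- ===== PRECONDITION & SPEC =====
def Spec_sort_digits (d : List Int) (out : String) : Prop := out = sort_digits_alt d
instance (d : List Int) (out : String) : Decidable (Spec_sort_digits d out) := by unfold Spec_sort_digits; infer_instance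

-- ===== CLAIM (what is proved, stated in full; the proofs are below) =====
def Claim_equal_sort_digits : Prop := ∀ (d : List Int), Dom_sort_digits d → Spec_sort_digits d (sort_digits d)

-- ===== LEMMAS AND PROOFS =====

-- inserting an element whose key is true (even) goes to the very end: true < key y never holds
lemma insertBy_key_true (key : Int → Bool) (x : Int) (hx : key x = true) (ys : List Int) :
    PySem.List.insertBy (fun a b => decide (key a < key b)) x ys = ys ++ [x] := by
  induction ys with
  | nil => rfl
  | cons y ys ih =>
    simp only [PySem.List.insertBy, hx]
    have : ¬ (true < key y) := by cases key y <;> decide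
    simp only [decide_eq_true_eq, if_neg this]
    simpa [PySem.List.insertBy] using ih

-- inserting an element whose key is false (odd) into odds ++ evens lands between them (stability)
lemma insertBy_key_false (key : Int → Bool) (x : Int) (hx : key x = false)
    (os es : List Int) (hos : ∀ y ∈ os, key y = false) (hes : ∀ y ∈ es, key y = true) :
    PySem.List.insertBy (fun a b => decide (key a < key b)) x (os ++ es) = os ++ x :: es := by
  induction os with
  | nil =>
    cases es with
    | nil => rfl
    | cons e es' =>
      have he : key e = true := hes e (by simp)
      simp [PySem.List.insertBy, hx, he]
  | cons o os' ih =>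
    have ho : key o = false := hos o (by simp)
    have ih' := ih (fun y hy => hos y (by simp [hy]))
    simp [PySem.List.insertBy, hx, ho, ih']

-- stable sort with a Bool key = elements with key false (in order) ++ elements with key true (in order)
lemma sorted_bool_key (key : Int → Bool) (d : List Int) :
    PySem.List.sorted d key false = d.filter (fun x => !key x) ++ d.filter key := by
  rw [PySem.List.sorted_eq_foldl_insertBy]
  suffices h : ∀ (os es : List Int), (∀ y ∈ os, key y = false) → (∀ y ∈ es, key y = true) →
      d.foldl (fun acc x => PySem.List.insertBy (fun a b => decide (key a < key b)) x acc) (os ++ es)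
        = (os ++ d.filter (fun x => !key x)) ++ (es ++ d.filter key) by
    simpa using h [] [] (by simp) (by simp)
  induction d with
  | nil => intro os es _ _; simp
  | cons x d ih =>
    intro os es hos hes
    by_cases hx : key x = true
    · simp only [List.foldl_cons, insertBy_key_true key x hx (os ++ es), List.append_assoc]
      have := ih os (es ++ [x]) hos (by
        intro y hy; rcases List.mem_append.mp hy with h | h
        · exact hes y h
        · simp at h; simpa [h] using hx)
      simpa [List.filter_cons, hx, List.append_assoc] using this
    · have hx' : key x = false := by simpa using hx
      simp only [List.foldl_cons, insertBy_key_false key x hx' os es hos hes]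
      have := ih (os ++ [x]) es (by
        intro y hy; rcases List.mem_append.mp hy with h | h
        · exact hos y h
        · simp at h; simpa [h] using hx') hes
      simpa [List.filter_cons, hx', List.append_assoc] using this

-- A's guard 'x % 2 == 0 or x == 0' is exactly the parity key (x == 0 already has x % 2 == 0)
lemma guard_eq_key (x : Int) :
    ((PySem.Int.mod x 2 == 0 : Bool) || (x == 0)) = (PySem.Int.mod x 2 == 0) := by
  by_cases h : x = 0
  · subst h; decide
  · simp [h]

-- the partition loop of A, with both accumulators generalized
lemma partition_fold (c : Int → Bool) (d : List Int) (o e : List Int) :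
    d.foldl (fun (p : List Int × List Int) x =>
        if c x then (p.1, p.2 ++ [x]) else (p.1 ++ [x], p.2)) (o, e)
      = (o ++ d.filter (fun x => !c x), e ++ d.filter c) := by
  induction d generalizing o e with
  | nil => simp
  | cons x d ih =>
    by_cases hx : c x = true
    · simp [hx, ih]
    · simp only [Bool.not_eq_true] at hx
      simp [hx, ih]

theorem sort_digits_spec_aux (d : List Int) : sort_digits d = sort_digits_alt d := by
  unfold sort_digits sort_digits_alt
  dsimp only
  rw [sorted_bool_key]
  rw [partition_fold (fun x => PySem.Int.mod x 2 == 0 || x == 0) d [] []]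
  rw [PySem.List.foldl_append_eq_flatMap, PySem.List.foldl_append_eq_flatMap]
  have hf : ∀ (p : Bool → Bool),
      (List.filter (fun x => p (PySem.Int.mod x 2 == 0 || x == 0)) d)
        = List.filter (fun x => p (PySem.Int.mod x 2 == 0)) d := by
    intro p
    exact List.filter_congr (fun x _ => by rw [guard_eq_key])
  simp only [List.nil_append]
  rw [hf (fun b => !b), hf (fun b => b)]
  simp [List.flatMap_def]

-- ===== VERDICT (by name: the statement is the Claim_ definition above) =====
theorem sort_digits_spec : Claim_equal_sort_digits := by
  intro d _
  unfold Spec_sort_digits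
  exact sort_digits_spec_aux d
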